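-- pv_equiv track=rewrite | github.com/nicepyprod/csv-surgeon | csv_surgeon/crossjoin.py | semi_join
-- ===== SOURCE A (Python) =====
-- from typing import Iterator, List, Dict, Optional
--
-- def semi_join(
--     left: List[Dict[str, str]],
--     right: List[Dict[str, str]],
--     key: str,
--     right_key: Optional[str] = None,
-- ) -> Iterator[Dict[str, str]]:
--     """Yield left rows whose key value exists in right (SQL semi-join)."""
--     rk = right_key or key
--     right_keys = {r[rk] for r in right if rk in r}
--     for row in left:
--         if row.get(key) in right_keys:
--             yield row
-- ===== SOURCE B (Python) =====
-- from typing import Iterator, List, Dict, Optional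
--
-- def semi_join(
--     left: List[Dict[str, str]],
--     right: List[Dict[str, str]],
--     key: str,
--     right_key: Optional[str] = None,
-- ) -> Iterator[Dict[str, str]]:
--     """Semi-join via an inverted index on the LEFT side: group left row
--     indices by their key value, mark matched indices in one scan of right,
--     then replay left in order filtering by the boolean mask."""
--     k2 = right_key or key
--     by_val = {}
--     i = 0
--     for row in left:
--         if key in row:
--             by_val.setdefault(row[key], []).append(i)
--         i += 1
--     keep = [False] * len(left)
--     for r in right:
--         if k2 in r:
--             for j in by_val.get(r[k2], []):
--                 keep[j] = True
--     i = 0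
--     for row in left:
--         if keep[i]:
--             yield row
--         i += 1
-- ===== Notes on version B (the rewrite author's own statement) =====
-- stated objective: alternative
-- what changed: B replaces A's precomputed set of right-side key values with an inverted index on the LEFT (dict mapping key value to left row indices), marks matched indices in one scan of right into a boolean mask, and replays left in order filtering by the mask.
import Mathlib
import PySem

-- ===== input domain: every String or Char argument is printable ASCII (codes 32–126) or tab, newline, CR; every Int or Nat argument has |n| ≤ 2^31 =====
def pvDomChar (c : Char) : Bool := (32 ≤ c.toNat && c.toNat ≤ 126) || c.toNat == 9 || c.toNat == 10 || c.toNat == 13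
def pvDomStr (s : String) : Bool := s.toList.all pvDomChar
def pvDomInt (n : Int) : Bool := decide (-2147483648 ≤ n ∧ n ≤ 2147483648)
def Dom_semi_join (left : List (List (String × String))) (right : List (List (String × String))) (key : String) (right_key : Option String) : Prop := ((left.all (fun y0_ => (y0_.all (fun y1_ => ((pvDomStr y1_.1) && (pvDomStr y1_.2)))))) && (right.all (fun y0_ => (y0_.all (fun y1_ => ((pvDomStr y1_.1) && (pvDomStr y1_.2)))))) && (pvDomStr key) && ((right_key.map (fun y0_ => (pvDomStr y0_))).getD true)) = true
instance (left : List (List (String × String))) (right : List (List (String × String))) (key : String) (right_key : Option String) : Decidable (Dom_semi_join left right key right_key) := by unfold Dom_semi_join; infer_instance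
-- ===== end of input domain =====

-- B replaces A's precomputed set of right key values by an inverted index on the LEFT
-- (key value ↦ left row indices), a one-scan boolean mask over right, and a replay of
-- left filtered by the mask — a structurally different semi-join (objective: alternative).

-- ===== PORT A =====
-- dict lookup (assoc list, first match): row.get(k) / row[k]; 'k in row' = (rowGet row k).isSome
def rowGet (r : List (String × String)) (k : String) : Option String :=
  match r with
  | [] => none
  | (a, b) :: rest => if a == k then some b else rowGet rest k

-- rk = right_key or key  (Python: empty string is falsy)
def rkOf (key : String) (right_key : Option String) : String :=
  match right_key with
  | some s => if s == "" then key else s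
  | none => key

def semi_join (left : List (List (String × String))) (right : List (List (String × String))) (key : String) (right_key : Option String) : List (List (String × String)) :=
  let rk := rkOf key right_key
  let right_keys : PySem.Set String :=
    right.foldl (fun acc r =>
      match rowGet r rk with
      | some v => PySem.Set.add acc v
      | none => acc) PySem.Set.empty
  left.filter (fun row =>
    match rowGet row key with
    | some v => PySem.Set.contains right_keys v
    | none => false)

-- ===== PORT B =====
-- first loop of Source B: by_val.setdefault(row[key], []).append(i) over left with counter i
def buildIndex (rows : List (List (String × String))) (key : String) (i : Nat)
    (d : PySem.Dict String (List Nat)) : PySem.Dict String (List Nat) :=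
  match rows with
  | [] => d
  | row :: rest =>
    match rowGet row key with
    | some v => buildIndex rest key (i + 1) (d.modify v [] (· ++ [i]))
    | none => buildIndex rest key (i + 1) d

-- inner loop: for j in by_val.get(r[rk], []): keep[j] = True  (all j are in range)
def setTrue (js : List Nat) (k : List Bool) : List Bool :=
  js.foldl (fun k j => k.set j true) k

-- second loop of Source B: one scan of right marking matched left indices
def markMatches (right : List (List (String × String))) (rk : String)
    (bv : PySem.Dict String (List Nat)) (keep : List Bool) : List Bool :=
  right.foldl (fun k r =>
    match rowGet r rk with
    | some v => setTrue (bv.getD v []) k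
    | none => k) keep

-- third loop of Source B: replay left, yielding rows whose mask bit is set (i always in range)
def emit (rows : List (List (String × String))) (keep : List Bool) (i : Nat) :
    List (List (String × String)) :=
  match rows with
  | [] => []
  | row :: rest =>
    if keep.getD i false then row :: emit rest keep (i + 1) else emit rest keep (i + 1)

def semi_join_alt (left : List (List (String × String))) (right : List (List (String × String))) (key : String) (right_key : Option String) : List (List (String × String)) :=
  let rk := rkOf key right_key
  let bv := buildIndex left key 0 PySem.Dict.empty
  let keep := markMatches right rk bv (List.replicate left.length false)
  emit left keep 0

-- ===== PRECONDITION & SPEC =====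
def Spec_semi_join (left : List (List (String × String))) (right : List (List (String × String))) (key : String) (right_key : Option String) (out : List (List (String × String))) : Prop := out = semi_join_alt left right key right_key
instance (left : List (List (String × String))) (right : List (List (String × String))) (key : String) (right_key : Option String) (out : List (List (String × String))) : Decidable (Spec_semi_join left right key right_key out) := by unfold Spec_semi_join; infer_instance

-- ===== CLAIM (what is proved, stated in full; the proofs are below) =====
def Claim_equal_semi_join : Prop := ∀ (left : List (List (String × String))) (right : List (List (String × String))) (key : String) (right_key : Option String), Dom_semi_join left right key right_key → Spec_semi_join left right key right_key (semi_join left right key right_key)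

-- ===== LEMMAS AND PROOFS =====

-- the common row predicate both sides compute
def pMatch (right : List (List (String × String))) (rk key : String)
    (row : List (String × String)) : Bool :=
  match rowGet row key with
  | some v => right.any (fun r => rowGet r rk == some v)
  | none => false

-- membership in A's incrementally built set of right key values
theorem mem_rightKeys (rk v : String) (right : List (List (String × String))) (acc : PySem.Set String) :
    v ∈ right.foldl (fun acc r =>
      match rowGet r rk with
      | some w => PySem.Set.add acc w
      | none => acc) acc ↔ v ∈ acc ∨ ∃ r ∈ right, rowGet r rk = some v := by
  induction right generalizing acc with
  | nil => simp
  | cons r rest ih =>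
    simp only [List.foldl_cons, List.mem_cons]
    cases h : rowGet r rk with
    | none =>
      rw [ih]
      constructor
      · rintro (hv | ⟨s, hs, hsv⟩)
        · exact Or.inl hv
        · exact Or.inr ⟨s, Or.inr hs, hsv⟩
      · rintro (hv | ⟨s, (rfl | hs), hsv⟩)
        · exact Or.inl hv
        · rw [h] at hsv; cases hsv
        · exact Or.inr ⟨s, hs, hsv⟩
    | some w =>
      rw [ih]
      simp only [PySem.Set.mem_add]
      constructor
      · rintro ((hv | rfl) | ⟨s, hs, hsv⟩)
        · exact Or.inl hv
        · exact Or.inr ⟨r, Or.inl rfl, h⟩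
        · exact Or.inr ⟨s, Or.inr hs, hsv⟩
      · rintro (hv | ⟨s, (rfl | hs), hsv⟩)
        · exact Or.inl (Or.inl hv)
        · rw [h] at hsv; exact Or.inl (Or.inr (Option.some_injective _ hsv.symm))
        · exact Or.inr ⟨s, hs, hsv⟩

-- A computes the filter of left by pMatch
theorem A_eq_filter (left right : List (List (String × String))) (key : String) (rk : String) :
    (left.filter (fun row =>
      match rowGet row key with
      | some v => PySem.Set.contains
          (right.foldl (fun acc r =>
            match rowGet r rk with
            | some w => PySem.Set.add acc w
            | none => acc) PySem.Set.empty) v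
      | none => false)) = left.filter (pMatch right rk key) := by
  apply List.filter_congr
  intro row _
  unfold pMatch
  cases hk : rowGet row key with
  | none => simp
  | some v =>
    simp only
    rw [Bool.eq_iff_iff, List.any_eq_true]
    rw [show PySem.Set.contains _ v = true ↔ _ from PySem.Set.contains_iff _ _]
    rw [mem_rightKeys]
    constructor
    · rintro (hv | ⟨r, hr, hrv⟩)
      · cases hv
      · exact ⟨r, hr, by simp [hrv]⟩
    · rintro ⟨r, hr, hrb⟩
      simp only [beq_iff_eq] at hrb
      exact Or.inr ⟨r, hr, hrb⟩

-- characterisation of B's inverted index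
theorem mem_buildIndex (rows : List (List (String × String))) (key : String) (i : Nat)
    (d : PySem.Dict String (List Nat)) (v : String) (j : Nat) :
    j ∈ (buildIndex rows key i d).getD v [] ↔
      j ∈ d.getD v [] ∨ ∃ (k : Nat) (h : k < rows.length), rowGet rows[k] key = some v ∧ j = i + k := by
  induction rows generalizing i d with
  | nil => simp [buildIndex]
  | cons row rest ih =>
    cases h : rowGet row key with
    | none =>
      simp only [buildIndex, h, ih]
      constructor
      · rintro (hd | ⟨k, hk, hkv, rfl⟩)
        · exact Or.inl hd
        · exact Or.inr ⟨k + 1, by simpa using hk, by simpa using hkv, by omega⟩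
      · rintro (hd | ⟨k, hk, hkv, rfl⟩)
        · exact Or.inl hd
        · cases k with
          | zero => simp only [List.getElem_cons_zero] at hkv; rw [h] at hkv; cases hkv
          | succ k =>
            exact Or.inr ⟨k, by simpa using hk, by simpa using hkv, by omega⟩
    | some w =>
      simp only [buildIndex, h, ih]
      rw [PySem.Dict.getD_modify]
      constructor
      · rintro (hd | ⟨k, hk, hkv, rfl⟩)
        · by_cases hvw : v = w
          · subst hvw
            rw [if_pos rfl] at hd
            rcases List.mem_append.mp hd with hd | hd
            · exact Or.inl hd
            · rcases List.mem_singleton.mp hd with rfl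
              exact Or.inr ⟨0, by simp, by simpa using h, by omega⟩
          · rw [if_neg hvw] at hd
            exact Or.inl hd
        · exact Or.inr ⟨k + 1, by simpa using hk, by simpa using hkv, by omega⟩
      · rintro (hd | ⟨k, hk, hkv, rfl⟩)
        · by_cases hvw : v = w
          · subst hvw
            exact Or.inl (by simp [hd])
          · exact Or.inl (by rw [if_neg hvw]; exact hd)
        · cases k with
          | zero =>
            simp only [List.getElem_cons_zero] at hkv; rw [h] at hkv
            cases hkv
            exact Or.inl (by simp)
          | succ k =>
            exact Or.inr ⟨k, by simpa using hk, by simpa using hkv, by omega⟩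

theorem setTrue_length (js : List Nat) (k : List Bool) : (setTrue js k).length = k.length := by
  induction js generalizing k with
  | nil => rfl
  | cons j js ih => simp only [setTrue, List.foldl_cons] at ih ⊢; rw [ih, List.length_set]

theorem setTrue_getElem? (js : List Nat) (k : List Bool) (i : Nat) (b : Bool)
    (h : k[i]? = some b) : (setTrue js k)[i]? = some (b || decide (i ∈ js)) := by
  induction js generalizing k b with
  | nil => simpa [setTrue]
  | cons j js ih =>
    have hi : i < k.length := (List.getElem?_eq_some_iff.mp h).1
    have hstep : (k.set j true)[i]? = some (b || decide (i = j)) := by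
      by_cases hij : i = j
      · subst hij
        rw [List.getElem?_set_self hi]; simp
      · rw [List.getElem?_set_ne (by omega), h]
        simp [hij]
    have := ih (k.set j true) (b || decide (i = j)) hstep
    simp only [setTrue, List.foldl_cons] at this ⊢
    rw [this]
    simp [List.mem_cons, Bool.or_assoc]

theorem markMatches_length (right : List (List (String × String))) (rk : String)
    (bv : PySem.Dict String (List Nat)) (keep : List Bool) :
    (markMatches right rk bv keep).length = keep.length := by
  induction right generalizing keep with
  | nil => rfl
  | cons r rest ih =>
    simp only [markMatches, List.foldl_cons] at ih ⊢
    cases rowGet r rk with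
    | none => exact ih keep
    | some v => rw [ih, setTrue_length]

theorem markMatches_getElem? (right : List (List (String × String))) (rk : String)
    (bv : PySem.Dict String (List Nat)) (keep : List Bool) (i : Nat) (b : Bool)
    (h : keep[i]? = some b) :
    (markMatches right rk bv keep)[i]? =
      some (b || right.any (fun r =>
        match rowGet r rk with
        | some v => decide (i ∈ bv.getD v [])
        | none => false)) := by
  induction right generalizing keep b with
  | nil => simpa [markMatches]
  | cons r rest ih =>
    simp only [markMatches, List.foldl_cons, List.any_cons] at ih ⊢
    cases hr : rowGet r rk with
    | none =>
      rw [ih keep b h]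
      simp
    | some v =>
      rw [ih (setTrue (bv.getD v []) keep) _ (setTrue_getElem? _ _ _ _ h)]
      simp [Bool.or_assoc]

-- the final mask is exactly left.map (pMatch right rk key)
theorem keep_eq_map (left right : List (List (String × String))) (key rk : String) :
    markMatches right rk (buildIndex left key 0 PySem.Dict.empty)
      (List.replicate left.length false) = left.map (pMatch right rk key) := by
  apply List.ext_getElem?
  intro i
  by_cases hi : i < left.length
  · have h0 : (List.replicate left.length false)[i]? = some false := by
      simp [hi]
    rw [markMatches_getElem? _ _ _ _ _ _ h0]
    rw [List.getElem?_map, List.getElem?_eq_getElem hi]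
    simp only [Option.map_some, Bool.false_or, Option.some.injEq]
    have hbv : ∀ v j, j ∈ (buildIndex left key 0 PySem.Dict.empty).getD v [] ↔
        ∃ h : j < left.length, rowGet left[j] key = some v := by
      intro v j
      rw [mem_buildIndex]
      simp only [PySem.Dict.getD_empty, List.not_mem_nil, false_or]
      constructor
      · rintro ⟨k, hk, hkv, rfl⟩
        exact ⟨by simpa using hk, by simpa using hkv⟩
      · rintro ⟨hj, hjv⟩
        exact ⟨j, hj, hjv, by omega⟩
    unfold pMatch
    cases hk : rowGet left[i] key with
    | none =>
      simp only
      rw [List.any_eq_false]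
      intro r _
      cases hr : rowGet r rk with
      | none => simp
      | some v =>
        simp only [decide_eq_true_eq, hbv]
        rintro ⟨_, hv⟩
        rw [hk] at hv; cases hv
    | some w =>
      simp only
      apply List.any_congr rfl
      intro r
      cases hr : rowGet r rk with
      | none => simp
      | some v =>
        simp only
        rw [Bool.eq_iff_iff, decide_eq_true_iff, beq_iff_eq, hbv]
        constructor
        · rintro ⟨_, hv⟩
          rw [hk] at hv
          exact hv.symm
        · intro hvw
          cases hvw
          exact ⟨hi, hk⟩
  · have hn : left.length ≤ i := by omega
    have h1 : (markMatches right rk (buildIndex left key 0 PySem.Dict.empty)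
        (List.replicate left.length false))[i]? = none :=
      List.getElem?_eq_none (by rwa [markMatches_length, List.length_replicate])
    have h2 : (left.map (pMatch right rk key))[i]? = none :=
      List.getElem?_eq_none (by rwa [List.length_map])
    rw [h1, h2]

-- emitting with the mask = pre ++ rows.map p at offset pre.length is filtering
theorem emit_eq_filter (p : List (String × String) → Bool)
    (rows : List (List (String × String))) (pre : List Bool) :
    emit rows (pre ++ rows.map p) pre.length = rows.filter p := by
  induction rows generalizing pre with
  | nil => rfl
  | cons row rest ih =>
    have hget : (pre ++ (row :: rest).map p).getD pre.length false = p row := by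
      simp [List.getD]
    have hrec : emit rest (pre ++ (row :: rest).map p) (pre.length + 1) = rest.filter p := by
      have h2 : pre ++ (row :: rest).map p = (pre ++ [p row]) ++ rest.map p := by simp
      have h3 : pre.length + 1 = (pre ++ [p row]).length := by simp
      rw [h2, h3]
      exact ih (pre ++ [p row])
    simp only [emit, hget, hrec, List.filter_cons]

-- definitional unfoldings of the two ports (the 'let's reduced)
theorem A_unfold (left right : List (List (String × String))) (key : String) (right_key : Option String) :
    semi_join left right key right_key = left.filter (fun row =>
      match rowGet row key with
      | some v => PySem.Set.contains
          (right.foldl (fun acc r =>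
            match rowGet r (rkOf key right_key) with
            | some w => PySem.Set.add acc w
            | none => acc) PySem.Set.empty) v
      | none => false) := rfl

theorem B_unfold (left right : List (List (String × String))) (key : String) (right_key : Option String) :
    semi_join_alt left right key right_key =
      emit left (markMatches right (rkOf key right_key)
        (buildIndex left key 0 PySem.Dict.empty)
        (List.replicate left.length false)) 0 := rfl

-- ===== VERDICT (by name: the statement is the Claim_ definition above) =====
theorem semi_join_spec : Claim_equal_semi_join := by
  intro left right key right_key _
  unfold Spec_semi_join
  rw [A_unfold, B_unfold, A_eq_filter, keep_eq_map]
  simpa using (emit_eq_filter (pMatch right (rkOf key right_key) key) left []).symm
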